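-- pv_equiv track=rewrite | github.com/BLON333/Learning-Math | auto_blackjack_counter.py | extract_cards
-- ===== SOURCE A (Python) =====
-- def extract_cards(text):
--     text = text.replace("10", "T")
--     parts = text.split()
--     cards = []
--     for part in parts:
--         for ch in part:
--             if ch in "23456789TJQKA":
--                 cards.append("10" if ch == "T" else ch)
--     return cards
-- ===== SOURCE B (Python) =====
-- CARD_CHARS = "23456789TJQKA"
--
-- def extract_cards(text):
--     cards = []
--     i = 0
--     n = len(text)
--     while i < n:
--         ch = text[i]
--         if ch == '1' and i + 1 < n and text[i + 1] == '0':
--             cards.append("10")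
--             i += 2
--         else:
--             if ch in CARD_CHARS:
--                 cards.append("10" if ch == 'T' else ch)
--             i += 1
--     return cards
-- ===== Notes on version B (the rewrite author's own statement) =====
-- stated objective: alternative
-- what changed: Replaced A's three-pass pipeline (str.replace('10','T'), str.split(), nested filtering loops) by a single index-based while-loop scan over the text that recognizes the '10' token inline and appends card characters directly.
import Mathlib
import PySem

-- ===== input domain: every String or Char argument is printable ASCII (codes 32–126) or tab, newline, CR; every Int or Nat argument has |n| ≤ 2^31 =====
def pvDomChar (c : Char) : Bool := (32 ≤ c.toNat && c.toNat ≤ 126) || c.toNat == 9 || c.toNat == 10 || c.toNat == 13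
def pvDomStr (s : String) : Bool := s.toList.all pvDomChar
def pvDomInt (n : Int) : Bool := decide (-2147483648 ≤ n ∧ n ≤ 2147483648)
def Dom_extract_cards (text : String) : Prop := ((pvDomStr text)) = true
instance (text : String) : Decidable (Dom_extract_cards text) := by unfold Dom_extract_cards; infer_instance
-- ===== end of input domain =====

-- B: single-pass scanner recognizing the "10" token inline, instead of A's
-- replace-then-split-then-filter pipeline; alternative decomposition, same result.

-- ===== PORT A =====
-- A: text = text.replace("10", "T"); parts = text.split(); nested loops appending
-- "10" for 'T' and the character itself for the other card characters.
-- 'ch in "23456789TJQKA"' for a single character ch is exactly char membership.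
def extract_cards (text : String) : List String :=
  let text' := PySem.Str.replace text "10" "T"
  let parts := PySem.Str.split₀ text'
  let cards : List String := []
  parts.foldl (fun cards part =>
    part.toList.foldl (fun cards ch =>
      if "23456789TJQKA".toList.contains ch then
        cards ++ [if ch = 'T' then "10" else String.ofList [ch]]
      else cards) cards) cards

-- ===== PORT B =====
-- B's 'while i < n' loop becomes recursion on the remaining characters: the test
-- "text[i]=='1' and i+1<n and text[i+1]=='0'" is 'c = '1' ∧ rest.head? = some '0''
-- (advance by 2 = recurse on rest.tail); the else-branch mirrors B's else-branch.
def extract_cards_altGo : List Char → List String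
  | [] => []
  | c :: rest =>
      if c = '1' ∧ rest.head? = some '0' then
        "10" :: extract_cards_altGo rest.tail
      else if "23456789TJQKA".toList.contains c then
        (if c = 'T' then "10" else String.ofList [c]) :: extract_cards_altGo rest
      else extract_cards_altGo rest
  termination_by l => l.length
  decreasing_by all_goals (simp; try omega)

def extract_cards_alt (text : String) : List String := extract_cards_altGo text.toList

-- ===== PRECONDITION & SPEC =====
def Spec_extract_cards (text : String) (out : List String) : Prop := out = extract_cards_alt text
instance (text : String) (out : List String) : Decidable (Spec_extract_cards text out) := by unfold Spec_extract_cards; infer_instance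

-- ===== CLAIM (what is proved, stated in full; the proofs are below) =====
def Claim_equal_extract_cards : Prop := ∀ (text : String), Dom_extract_cards text → Spec_extract_cards text (extract_cards text)

-- ===== LEMMAS AND PROOFS =====

-- Character-level mirror of Python's text.replace("10", "T").
def pvRepl : List Char → List Char
  | [] => []
  | c :: rest =>
      if c = '1' ∧ rest.head? = some '0' then 'T' :: pvRepl rest.tail
      else c :: pvRepl rest
  termination_by l => l.length
  decreasing_by all_goals (simp; try omega)

lemma pvPrefix_iff (c : Char) (rest : List Char) :
    List.isPrefixOf ['1','0'] (c :: rest) = true ↔ (c = '1' ∧ rest.head? = some '0') := by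
  cases rest <;> simp [List.isPrefixOf_cons₂, @eq_comm Char]

lemma pvRepl_go (fuel : Nat) (l acc : List Char) (h : l.length ≤ fuel) :
    PySem.Chars.replace.go ['1','0'] ['T'] fuel l acc = acc.reverse ++ pvRepl l := by
  induction fuel generalizing l acc with
  | zero =>
      cases l with
      | nil => simp [PySem.Chars.replace.go, pvRepl]
      | cons c t => simp at h
  | succ fuel ih =>
      cases l with
      | nil => simp [PySem.Chars.replace.go, pvRepl]
      | cons c rest =>
          rw [PySem.Chars.replace.go]
          by_cases hp : c = '1' ∧ rest.head? = some '0'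
          · rw [if_pos ((pvPrefix_iff c rest).mpr hp)]
            obtain ⟨rfl, hh⟩ := hp
            cases rest with
            | nil => simp at hh
            | cons c2 t =>
                have hc2 : c2 = '0' := by simpa using hh
                subst hc2
                have hd : List.drop (['1','0'].length) ('1' :: '0' :: t) = t := rfl
                rw [hd, ih t _ (by simp at h; omega)]
                rw [pvRepl, if_pos (by simp : ('1' : Char) = '1' ∧ (('0'::t).head? = some '0'))]
                simp
          · rw [if_neg (by rw [pvPrefix_iff]; exact hp)]
            rw [ih rest _ (by simp at h; omega)]
            rw [pvRepl, if_neg hp]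
            simp

lemma pvReplace_eq (l : List Char) :
    PySem.Chars.replace l ("10".toList) ("T".toList) = pvRepl l := by
  have h10 : "10".toList = ['1','0'] := by decide
  have hT : "T".toList = ['T'] := by decide
  rw [h10, hT, PySem.Chars.replace]
  simpa using pvRepl_go l.length l [] le_rfl

lemma pvSplit_go_flatten (l cur : List Char) (acc : List (List Char)) :
    (PySem.Chars.split₀.go l cur acc).flatten
      = acc.reverse.flatten ++ cur.reverse ++ l.filter (fun c => !PySem.Chars.isspace c) := by
  induction l generalizing cur acc with
  | nil =>
      rw [PySem.Chars.split₀.go]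
      by_cases hc : cur.isEmpty = true
      · simp [List.isEmpty_iff.mp hc]
      · simp [hc]
  | cons c rest ih =>
      rw [PySem.Chars.split₀.go]
      by_cases hs : PySem.Chars.isspace c = true
      · by_cases hc : cur.isEmpty = true
        · simp [hs, ih, List.isEmpty_iff.mp hc]
        · simp [hs, hc, ih]
      · simp [hs, ih]

lemma pvSplit_flatten (l : List Char) :
    (PySem.Chars.split₀ l).flatten = l.filter (fun c => !PySem.Chars.isspace c) := by
  rw [PySem.Chars.split₀]
  simpa using pvSplit_go_flatten l [] []

lemma pvAlt_eq (l : List Char) :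
    extract_cards_altGo l
      = ((pvRepl l).filter (fun c => "23456789TJQKA".toList.contains c)).map
          (fun ch => if ch = 'T' then "10" else String.ofList [ch]) := by
  fun_induction extract_cards_altGo l with
  | case1 => simp [pvRepl]
  | case2 c rest hp ih =>
      rw [pvRepl, if_pos hp, List.filter_cons_of_pos (by decide), List.map_cons, ← ih]
      norm_num
  | case3 c rest hp hc ih =>
      rw [pvRepl, if_neg hp, List.filter_cons_of_pos hc, List.map_cons, ← ih]
  | case4 c rest hp hc ih =>
      rw [pvRepl, if_neg hp, List.filter_cons_of_neg (by simpa using hc), ← ih]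

lemma pvCardNotSpace :
    ∀ c, ("23456789TJQKA".toList.contains c && !PySem.Chars.isspace c)
        = "23456789TJQKA".toList.contains c := by
  intro c
  by_cases h : "23456789TJQKA".toList.contains c = true
  · have hns : PySem.Chars.isspace c = false := by
      have hd := h
      simp at hd
      rcases hd with rfl|rfl|rfl|rfl|rfl|rfl|rfl|rfl|rfl|rfl|rfl|rfl|rfl <;> decide
    rw [h, hns]
    decide
  · simp only [Bool.not_eq_true] at h
    rw [h, Bool.false_and]

theorem pv_main (text : String) : extract_cards text = extract_cards_alt text := by
  unfold extract_cards extract_cards_alt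
  simp only [PySem.List.foldl_append_if
      (fun ch => "23456789TJQKA".toList.contains ch)
      (fun ch => if ch = 'T' then "10" else String.ofList [ch])]
  rw [PySem.List.foldl_append_eq_flatMap
      (fun (part : String) =>
        (part.toList.filter fun ch => "23456789TJQKA".toList.contains ch).map
          (fun ch => if ch = 'T' then "10" else String.ofList [ch]))]
  rw [PySem.Str.split₀, PySem.Str.replace, List.flatMap_map]
  simp only [String.toList_ofList, List.nil_append]
  rw [pvReplace_eq]
  have hflat : ∀ L : List (List Char),
      List.flatMap (fun cs : List Char =>
        (cs.filter fun ch => "23456789TJQKA".toList.contains ch).map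
          (fun ch => if ch = 'T' then "10" else String.ofList [ch])) L
      = ((L.flatten.filter fun ch => "23456789TJQKA".toList.contains ch).map
          (fun ch => if ch = 'T' then "10" else String.ofList [ch])) := by
    intro L
    rw [List.filter_flatten, List.map_flatten, List.map_map, List.flatMap_def]
    rfl
  rw [hflat, pvSplit_flatten, List.filter_filter]
  simp only [pvCardNotSpace]
  rw [← pvAlt_eq]

-- ===== VERDICT (by name: the statement is the Claim_ definition above) =====
theorem extract_cards_spec : Claim_equal_extract_cards := by
  intro text _
  unfold Spec_extract_cards
  exact pv_main text
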